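-- pv_equiv track=rewrite | github.com/abhiXsliet/Solved-DSA-Problems | Leetcode Daily Challenge/032-February-2026/003-trionic-array-i.py | isTrionic
-- ===== SOURCE A (Python) =====
-- from typing import List
--
-- def isTrionic(nums: List[int]) -> bool:
--     n = len(nums)
--     cnt = 0
--     isInc = False
--     for i in range(n - 1):
--         if nums[i + 1] > nums[i]:
--             if not isInc:
--                 cnt += 1
--                 isInc = True
--         elif nums[i + 1] < nums[i]:
--             if isInc:
--                 cnt += 1
--                 isInc = False
--             else:
--                 if cnt == 0:
--                     return False
--         else:
--             return False
--     return cnt == 3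
-- ===== SOURCE B (Python) =====
-- from typing import List
--
-- def isTrionic(nums: List[int]) -> bool:
--     n = len(nums)
--     i = 0
--     while i + 1 < n and nums[i + 1] > nums[i]:
--         i += 1
--     if i == 0:
--         return False
--     p = i
--     while i + 1 < n and nums[i + 1] < nums[i]:
--         i += 1
--     if i == p:
--         return False
--     q = i
--     while i + 1 < n and nums[i + 1] > nums[i]:
--         i += 1
--     if i == q:
--         return False
--     return i == n - 1
-- ===== Notes on version B (the rewrite author's own statement) =====
-- stated objective: alternative
-- what changed: Replaced A's single pass counting inc/dec transitions with a cnt/isInc flag state machine by an explicit three-phase pointer walk that consumes the increasing, decreasing and increasing runs in turn and accepts iff each phase advances and the pointer ends at the last index.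
import Mathlib
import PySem

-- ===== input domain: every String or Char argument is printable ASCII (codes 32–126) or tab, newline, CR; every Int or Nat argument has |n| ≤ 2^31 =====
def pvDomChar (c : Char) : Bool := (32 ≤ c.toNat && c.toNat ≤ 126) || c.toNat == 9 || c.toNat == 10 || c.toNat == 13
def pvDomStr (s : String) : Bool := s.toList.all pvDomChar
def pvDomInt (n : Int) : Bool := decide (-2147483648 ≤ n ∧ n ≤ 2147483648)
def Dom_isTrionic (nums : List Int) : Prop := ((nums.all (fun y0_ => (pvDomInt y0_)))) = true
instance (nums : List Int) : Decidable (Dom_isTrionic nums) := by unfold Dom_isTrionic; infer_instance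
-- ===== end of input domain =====

-- B replaces A's single transition-counting loop (cnt/isInc flags) by an explicit
-- three-phase pointer walk consuming the inc, dec, inc runs; same cost, plainer structure.

-- ===== PORT A =====
-- A's for-loop over adjacent pairs with state (cnt, isInc) and early returns,
-- as structural recursion on the suffix starting at the current element.
def loopA : List Int → Int → Bool → Bool
  | a :: b :: rest, cnt, isInc =>
    if b > a then
      (if !isInc then loopA (b :: rest) (cnt + 1) true else loopA (b :: rest) cnt isInc)
    else if b < a then
      (if isInc then loopA (b :: rest) (cnt + 1) false
       else if cnt == 0 then false else loopA (b :: rest) cnt isInc)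
    else false
  | _, cnt, _ => cnt == 3

def isTrionic (nums : List Int) : Bool := loopA nums 0 false

-- ===== PORT B =====
-- B's index i is represented by the remaining suffix (i = n - suffix.length);
-- each while-loop is a run-consuming helper, the 'i moved' tests become length tests.
def runInc : List Int → List Int
  | a :: b :: rest => if b > a then runInc (b :: rest) else a :: b :: rest
  | l => l

def runDec : List Int → List Int
  | a :: b :: rest => if b < a then runDec (b :: rest) else a :: b :: rest
  | l => l

def isTrionic_alt (nums : List Int) : Bool :=
  let l1 := runInc nums
  if l1.length == nums.length then false
  else
    let l2 := runDec l1
    if l2.length == l1.length then false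
    else
      let l3 := runInc l2
      if l3.length == l2.length then false
      else l3.length == 1

-- ===== PRECONDITION & SPEC =====
def Spec_isTrionic (nums : List Int) (out : Bool) : Prop := out = isTrionic_alt nums
instance (nums : List Int) (out : Bool) : Decidable (Spec_isTrionic nums out) := by unfold Spec_isTrionic; infer_instance

-- ===== CLAIM (what is proved, stated in full; the proofs are below) =====
def Claim_equal_isTrionic : Prop := ∀ (nums : List Int), Dom_isTrionic nums → Spec_isTrionic nums (isTrionic nums)

-- ===== LEMMAS AND PROOFS =====

theorem runInc_gt (a b : Int) (rs : List Int) (h : b > a) :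
    runInc (a :: b :: rs) = runInc (b :: rs) := by simp [runInc, h]

theorem runInc_not_gt (a b : Int) (rs : List Int) (h : ¬ b > a) :
    runInc (a :: b :: rs) = a :: b :: rs := by simp [runInc, h]

theorem runDec_lt (a b : Int) (rs : List Int) (h : b < a) :
    runDec (a :: b :: rs) = runDec (b :: rs) := by simp [runDec, h]

theorem runDec_not_lt (a b : Int) (rs : List Int) (h : ¬ b < a) :
    runDec (a :: b :: rs) = a :: b :: rs := by simp [runDec, h]

theorem runInc_length_le : ∀ l : List Int, (runInc l).length ≤ l.length := by
  intro l
  match l with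
  | [] => simp [runInc]
  | [a] => simp [runInc]
  | a :: b :: rest =>
    by_cases h : b > a
    · rw [runInc_gt a b rest h]
      have := runInc_length_le (b :: rest); simp at this ⊢; omega
    · rw [runInc_not_gt a b rest h]

theorem runDec_length_le : ∀ l : List Int, (runDec l).length ≤ l.length := by
  intro l
  match l with
  | [] => simp [runDec]
  | [a] => simp [runDec]
  | a :: b :: rest =>
    by_cases h : b < a
    · rw [runDec_lt a b rest h]
      have := runDec_length_le (b :: rest); simp at this ⊢; omega
    · rw [runDec_not_lt a b rest h]

-- once cnt ≥ 4 the loop can never end with cnt == 3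
theorem loopA_ge4 : ∀ (rest : List Int) (a cnt : Int) (inc : Bool),
    4 ≤ cnt → loopA (a :: rest) cnt inc = false := by
  intro rest
  induction rest with
  | nil => intro a cnt inc h; simp [loopA]; omega
  | cons b rs ih =>
    intro a cnt inc h
    have hc0 : (cnt == 0) = false := by simp; omega
    rcases lt_trichotomy b a with hlt | heq | hgt
    · have hng : ¬ a < b := by omega
      have L : loopA (a :: b :: rs) cnt inc =
          (if inc then loopA (b :: rs) (cnt + 1) false else loopA (b :: rs) cnt inc) := by
        simp [loopA, hlt, hng, hc0]
      rw [L]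
      cases inc with
      | true => simpa using ih b (cnt + 1) false (by omega)
      | false => simpa using ih b cnt false h
    · simp [loopA, heq]
    · have L : loopA (a :: b :: rs) cnt inc =
          (if inc then loopA (b :: rs) cnt true else loopA (b :: rs) (cnt + 1) true) := by
        cases inc <;> simp [loopA, hgt]
      rw [L]
      cases inc with
      | true => simpa using ih b cnt true h
      | false => simpa using ih b (cnt + 1) true (by omega)

-- phase 3 (state cnt = 3, isInc = true): succeed iff the increasing run reaches the end
theorem loopA_phase3 : ∀ (rest : List Int) (a : Int),
    loopA (a :: rest) 3 true = ((runInc (a :: rest)).length == 1) := by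
  intro rest
  induction rest with
  | nil => simp [loopA, runInc]
  | cons b rs ih =>
    intro a
    rcases lt_trichotomy b a with hlt | heq | hgt
    · have hng : ¬ a < b := by omega
      have L : loopA (a :: b :: rs) 3 true = loopA (b :: rs) (3 + 1) false := by
        simp [loopA, hlt, hng]
      rw [L, loopA_ge4 rs b (3 + 1) false (by omega), runInc_not_gt a b rs (by omega)]
      simp
    · simp [loopA, runInc, heq]
    · have L : loopA (a :: b :: rs) 3 true = loopA (b :: rs) 3 true := by
        simp [loopA, hgt]
      rw [L, runInc_gt a b rs hgt]; exact ih b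

-- phase 2 (state cnt = 2, isInc = false)
theorem loopA_phase2 : ∀ (rest : List Int) (a : Int),
    loopA (a :: rest) 2 false =
      (let l2 := runDec (a :: rest)
       let l3 := runInc l2
       if l3.length == l2.length then false else l3.length == 1) := by
  intro rest
  induction rest with
  | nil => simp [loopA, runDec, runInc]
  | cons b rs ih =>
    intro a
    rcases lt_trichotomy b a with hlt | heq | hgt
    · have hng : ¬ a < b := by omega
      have L : loopA (a :: b :: rs) 2 false = loopA (b :: rs) 2 false := by
        simp [loopA, hlt, hng, (by decide : ((2:Int) == 0) = false)]
      rw [L, runDec_lt a b rs hlt]; exact ih b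
    · simp [loopA, runDec, runInc, heq]
    · have L : loopA (a :: b :: rs) 2 false = loopA (b :: rs) (2 + 1) true := by
        simp [loopA, hgt]
      rw [L]
      have : (2 : Int) + 1 = 3 := by norm_num
      rw [this, loopA_phase3 rs b, runDec_not_lt a b rs (by omega)]
      simp only [runInc_gt a b rs hgt]
      rw [if_neg (by have := runInc_length_le (b :: rs); simp at this ⊢; omega)]

-- phase 1 (state cnt = 1, isInc = true)
theorem loopA_phase1 : ∀ (rest : List Int) (a : Int),
    loopA (a :: rest) 1 true =
      (let l1 := runInc (a :: rest)
       let l2 := runDec l1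
       if l2.length == l1.length then false
       else
         let l3 := runInc l2
         if l3.length == l2.length then false else l3.length == 1) := by
  intro rest
  induction rest with
  | nil => simp [loopA, runInc, runDec]
  | cons b rs ih =>
    intro a
    rcases lt_trichotomy b a with hlt | heq | hgt
    · have hng : ¬ a < b := by omega
      have L : loopA (a :: b :: rs) 1 true = loopA (b :: rs) (1 + 1) false := by
        simp [loopA, hlt, hng]
      rw [L]
      have h12 : (1 : Int) + 1 = 2 := by norm_num
      rw [h12, loopA_phase2 rs b, runInc_not_gt a b rs (by omega)]
      simp only
      rw [runDec_lt a b rs hlt]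
      have hc : ((runDec (b :: rs)).length == (a :: b :: rs).length) = false := by
        have := runDec_length_le (b :: rs); simp at this ⊢; omega
      simp only [hc, Bool.false_eq_true, if_false]
    · simp [loopA, runInc, runDec, heq]
    · have L : loopA (a :: b :: rs) 1 true = loopA (b :: rs) 1 true := by
        simp [loopA, hgt]
      rw [L, runInc_gt a b rs hgt]; exact ih b

-- ===== VERDICT (by name: the statement is the Claim_ definition above) =====
theorem isTrionic_spec : Claim_equal_isTrionic := by
  intro nums _
  show isTrionic nums = isTrionic_alt nums
  match nums with
  | [] => rfl
  | [a] => simp [isTrionic, isTrionic_alt, loopA, runInc]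
  | a :: b :: rest =>
    rcases lt_trichotomy b a with hlt | heq | hgt
    · have hng : ¬ b > a := by omega
      simp [isTrionic, isTrionic_alt, loopA, runInc_not_gt a b rest hng, hlt, hng]
    · simp [isTrionic, isTrionic_alt, loopA, runInc, heq]
    · have L : isTrionic (a :: b :: rest) = loopA (b :: rest) (0 + 1) true := by
        simp [isTrionic, loopA, hgt]
      rw [L]
      have h01 : (0 : Int) + 1 = 1 := by norm_num
      rw [h01, loopA_phase1 rest b]
      simp only [isTrionic_alt]
      rw [runInc_gt a b rest hgt]
      have hc : ((runInc (b :: rest)).length == (a :: b :: rest).length) = false := by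
        have := runInc_length_le (b :: rest); simp at this ⊢; omega
      simp only [hc, Bool.false_eq_true, if_false]
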